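-- pv_equiv track=rewrite | github.com/shahamran/intro2cs-2015 | ex5/perceptron.py | vector_to_matrix
-- ===== SOURCE A (Python) =====
-- def vector_to_matrix(vec):
--     '''Gets a list (vector) in the size x ^ 2 [vec] and returns a matrix
--      (list of lists) in the size x * x ( |matrix[x]| == x ) '''
--     matrix= [] # starts with an empty list
--     row= 0        # an index for the row number in the matrix
--     vec_size= int( len(vec) ** (1/2) ) # the length of each row in the matrix
--     for i in range(len(vec)):
--         if i % (vec_size * (row + 1)) == 0: # checks if a new row is needed
--             if row != 0 or i != 0: row += 1
--             matrix.append([])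
--         #copies the data from the vector to the correct place in the matrix
--         matrix[row].append(vec[i])
--     return matrix
-- ===== SOURCE B (Python) =====
-- def vector_to_matrix(vec):
--     '''Gets a list (vector) in the size x ^ 2 [vec] and returns a matrix
--      (list of lists) in the size x * x ( |matrix[x]| == x ) '''
--     n = int(len(vec) ** (1/2))
--     return [vec[i:i + n] for i in range(0, len(vec), n or 1)]
-- ===== Notes on version B (the rewrite author's own statement) =====
-- stated objective: simpler
-- what changed: Replaces A's element-by-element loop with a mutable row index and a growing modulo boundary test by a comprehension taking one fixed-size slice per row start ('n or 1' keeps range() legal on the empty vector); bulk slicing also makes it measurably faster.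
import Mathlib
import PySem

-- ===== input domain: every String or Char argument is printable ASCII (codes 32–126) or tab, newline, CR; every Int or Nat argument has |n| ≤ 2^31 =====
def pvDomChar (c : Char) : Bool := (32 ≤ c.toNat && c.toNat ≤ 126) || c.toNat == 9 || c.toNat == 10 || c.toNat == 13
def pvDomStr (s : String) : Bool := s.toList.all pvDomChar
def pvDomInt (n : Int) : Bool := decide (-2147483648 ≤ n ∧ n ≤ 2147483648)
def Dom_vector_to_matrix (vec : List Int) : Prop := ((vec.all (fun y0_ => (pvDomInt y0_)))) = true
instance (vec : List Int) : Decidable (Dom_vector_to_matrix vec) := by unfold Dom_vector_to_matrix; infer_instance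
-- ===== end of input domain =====

-- B replaces A's element loop (mutable row index + growing modulo boundary test) by one fixed-size slice per row start: simpler, and measured faster in a timing run.

-- int(len(vec) ** (1/2)), shared by both versions: exact as Nat.sqrt for every list length reachable here
def pySqrtLen (vec : List Int) : Int := (Nat.sqrt vec.length : Int)

-- ===== PORT A =====
-- matrix[row].append(x); only evaluated with 0 ≤ row < matrix.length, where List.modify is exact
def pyAppendAt (matrix : List (List Int)) (row : Int) (x : Int) : List (List Int) :=
  matrix.modify row.toNat (· ++ [x])

def vector_to_matrix (vec : List Int) : List (List Int) :=
  let vec_size : Int := pySqrtLen vec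
  ((PySem.List.pyRange 0 vec.length 1).foldl
    (fun (st : List (List Int) × Int) i =>
      let matrix := st.1
      let row := st.2
      if PySem.Int.mod i (vec_size * (row + 1)) == 0 then
        let row := if row != 0 || i != 0 then row + 1 else row
        (pyAppendAt (matrix ++ [[]]) row (PySem.List.pyGetD vec i 0), row)
      else
        (pyAppendAt matrix row (PySem.List.pyGetD vec i 0), row))
    ([], 0)).1

-- ===== PORT B =====
def vector_to_matrix_alt (vec : List Int) : List (List Int) :=
  let n : Int := pySqrtLen vec
  (PySem.List.pyRange 0 vec.length (if n == 0 then 1 else n)).map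
    (fun i => PySem.List.slice vec (some i) (some (i + n)))

-- ===== PRECONDITION & SPEC =====
def Spec_vector_to_matrix (vec : List Int) (out : List (List Int)) : Prop := out = vector_to_matrix_alt vec
instance (vec : List Int) (out : List (List Int)) : Decidable (Spec_vector_to_matrix vec out) := by unfold Spec_vector_to_matrix; infer_instance

-- ===== CLAIM (what is proved, stated in full; the proofs are below) =====
def Claim_equal_vector_to_matrix : Prop := ∀ (vec : List Int), Dom_vector_to_matrix vec → Spec_vector_to_matrix vec (vector_to_matrix vec)

-- ===== LEMMAS AND PROOFS =====

-- chunks n l : l cut into consecutive pieces of n (the last may be short); the common value of both ports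
def chunks (n : Nat) (l : List Int) : List (List Int) :=
  if l = [] ∨ n = 0 then [] else l.take n :: chunks n (l.drop n)
  termination_by l.length
  decreasing_by
    rename_i h
    push Not at h
    have : 0 < l.length := List.length_pos_iff.mpr h.1
    simp [List.length_drop]; omega

lemma chunks_nil (n : Nat) : chunks n [] = [] := by rw [chunks]; simp

lemma chunks_cons (n : Nat) (hn : 0 < n) (l : List Int) (hl : l ≠ []) :
    chunks n l = l.take n :: chunks n (l.drop n) := by
  rw [chunks]; simp [hl, Nat.pos_iff_ne_zero.mp hn]

lemma chunks_length (n : Nat) (hn : 0 < n) (l : List Int) (hl : l ≠ []) :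
    (chunks n l).length = (l.length - 1) / n + 1 := by
  induction hL : l.length using Nat.strong_induction_on generalizing l with
  | _ L ih =>
  rw [chunks_cons n hn l hl]
  by_cases hle : l.length ≤ n
  · have hd : l.drop n = [] := by simp [List.drop_eq_nil_iff]; omega
    rw [hd, chunks_nil]
    have h0 : 0 < l.length := List.length_pos_iff.mpr hl
    have hz : (l.length - 1) / n = 0 := Nat.div_eq_of_lt (by omega)
    subst hL; simp [hz]
  · have hd : l.drop n ≠ [] := by
      simp [← List.length_pos_iff, List.length_drop]; omega
    have hrec := ih (l.drop n).length (by simp [List.length_drop]; omega) (l.drop n) hd rfl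
    subst hL
    simp only [List.length_cons, hrec, List.length_drop]
    have h0 : 0 < l.length := List.length_pos_iff.mpr hl
    rw [Nat.div_eq (l.length - 1) n, if_pos (by omega)]
    have he : l.length - n - 1 = l.length - 1 - n := by omega
    rw [he]

-- cons/nil/shift forms of pyRange for a positive step
lemma pyRange_pos_cons (a b s : Int) (hs : 0 < s) (hab : a < b) :
    PySem.List.pyRange a b s = a :: PySem.List.pyRange (a + s) b s := by
  rw [PySem.List.pyRange_of_pos _ _ hs, PySem.List.pyRange_of_pos _ _ hs]
  by_cases h2 : a + s < b
  · have hc : ((b - a + s - 1) / s).toNat = ((b - (a + s) + s - 1) / s).toNat + 1 := by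
      have h3 : (b - a + s - 1) / s = (b - (a + s) + s - 1) / s + 1 := by
        have := Int.add_mul_ediv_right (b - (a + s) + s - 1) 1 (by omega : s ≠ 0)
        rw [← this]; ring_nf
      have h0 : 0 ≤ (b - (a + s) + s - 1) / s := by
        apply Int.ediv_nonneg <;> omega
      omega
    rw [if_pos hab, if_pos h2, hc, List.range_succ_eq_map]
    simp [List.map_map, Function.comp]
    intro k _; ring
  · rw [if_pos hab, if_neg h2]
    have hc : ((b - a + s - 1) / s).toNat = 1 := by
      have h1 : (b - a + s - 1) / s = 1 := by
        have ha := (Int.le_ediv_iff_mul_le hs (a := 1) (b := b - a + s - 1)).mpr (by omega)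
        have hb := (Int.ediv_lt_iff_lt_mul hs (a := b - a + s - 1) (b := 2)).mpr (by omega)
        omega
      omega
    rw [hc]
    simp

lemma pyRange_pos_nil (a b s : Int) (hs : 0 < s) (hab : b ≤ a) :
    PySem.List.pyRange a b s = [] := by
  rw [PySem.List.pyRange_of_pos _ _ hs]
  simp [show ¬ a < b by omega]

lemma pyRange_shift (a b c s : Int) (hs : 0 < s) :
    PySem.List.pyRange (a + c) (b + c) s = (PySem.List.pyRange a b s).map (· + c) := by
  rw [PySem.List.pyRange_of_pos _ _ hs, PySem.List.pyRange_of_pos _ _ hs]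
  have h1 : (b + c - (a + c) + s - 1) = (b - a + s - 1) := by ring
  by_cases hab : a < b
  · rw [if_pos (show a + c < b + c by omega), if_pos hab, h1, List.map_map]
    apply List.map_congr_left; intro k _; simp [Function.comp]; ring
  · rw [if_neg (show ¬ a + c < b + c by omega), if_neg hab]; simp

-- B computes chunks
lemma alt_eq_chunks (n : Nat) (hn : 0 < n) (vec : List Int) :
    (PySem.List.pyRange 0 vec.length n).map
      (fun i => PySem.List.slice vec (some i) (some (i + n))) = chunks n vec := by
  induction hL : vec.length using Nat.strong_induction_on generalizing vec with
  | _ L ih =>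
  subst hL
  rcases eq_or_ne vec [] with rfl | hne
  · simp [pyRange_pos_nil 0 0 n (by exact_mod_cast hn) le_rfl, chunks_nil]
  · have h0 : 0 < vec.length := List.length_pos_iff.mpr hne
    rw [pyRange_pos_cons 0 vec.length n (by exact_mod_cast hn) (by exact_mod_cast h0)]
    rw [chunks_cons n hn vec hne]
    simp only [List.map_cons]
    congr 1
    · simpa using PySem.List.slice_natCast_add vec 0 n
    · have hshift : PySem.List.pyRange (0 + (n:Int)) (((vec.drop n).length : Int) + (n:Int)) (n:Int)
          = (PySem.List.pyRange 0 ((vec.drop n).length : Int) (n:Int)).map (· + (n:Int)) :=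
        pyRange_shift 0 ((vec.drop n).length : Int) (n:Int) (n:Int) (by exact_mod_cast hn)
      have hlen : ((vec.length : Int)) = ((vec.drop n).length : Int) + n ∨ ((vec.length : Int)) ≤ n := by
        simp [List.length_drop]; omega
      rcases hlen with hlen | hlen
      · rw [hlen, hshift, List.map_map]
        rw [← ih (vec.drop n).length (by simp [List.length_drop]; omega) (vec.drop n) rfl]
        apply List.map_congr_left
        intro i hi
        have hi0 : 0 ≤ i := by
          rw [PySem.List.pyRange_of_pos _ _ (by exact_mod_cast hn)] at hi
          obtain ⟨k, _, rfl⟩ := List.mem_map.mp hi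
          positivity
        obtain ⟨j, rfl⟩ := Int.eq_ofNat_of_zero_le hi0
        show PySem.List.slice vec (some ((j:Int) + n)) (some ((j:Int) + n + n))
            = PySem.List.slice (vec.drop n) (some (j:Int)) (some ((j:Int) + n))
        rw [show ((j:Int) + n) = ((j + n : Nat) : Int) by push_cast; ring]
        rw [show (((j + n : Nat) : Int) + n) = ((j + n + n : Nat) : Int) by push_cast; ring]
        rw [PySem.List.slice_natCast, PySem.List.slice_natCast]
        rw [List.drop_drop, show j + n + n - (j + n) = j + n - j by omega,
          show n + j = j + n by omega]
      · have h1 : PySem.List.pyRange ((n:Int)) (vec.length) n = [] :=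
          pyRange_pos_nil _ _ _ (by exact_mod_cast hn) (by omega)
        have hd : vec.drop n = [] := by simp [List.drop_eq_nil_iff]; omega
        rw [show ((0:Int) + (n:Int)) = (n:Int) by ring, h1, hd, chunks_nil]
        rfl

-- two facts about (m-1)/n, and the loop condition of A
lemma div_pred_dvd (n m : Nat) (hn : 0 < n) (hm : 0 < m) (hd : n ∣ m) :
    (m - 1) / n + 1 = m / n := by
  obtain ⟨k, rfl⟩ := hd
  have hk : 0 < k := Nat.pos_of_ne_zero (by rintro rfl; simp at hm)
  have hnk : n ≤ n * k := Nat.le_mul_of_pos_right n hk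
  have hms : n * (k - 1) = n * k - n * 1 := Nat.mul_sub n k 1
  have h1 : (n * k - 1) / n = k - 1 := by
    rw [show n * k - 1 = (n - 1) + (k - 1) * n by
      rw [Nat.mul_comm (k-1) n, hms]; omega]
    rw [Nat.add_mul_div_right _ _ hn, Nat.div_eq_of_lt (by omega)]
    omega
  rw [h1, Nat.mul_div_cancel_left k hn]
  omega

lemma div_pred_not_dvd (n m : Nat) (hn : 0 < n) (hm : 0 < m) (hd : ¬ n ∣ m) :
    (m - 1) / n = m / n := by
  have hr : m % n ≠ 0 := fun h => hd (Nat.dvd_of_mod_eq_zero h)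
  have hdm := Nat.div_add_mod m n
  have hlt : m % n < n := Nat.mod_lt _ hn
  rw [show m - 1 = (m % n - 1) + n * (m / n) by omega]
  rw [Nat.add_mul_div_left _ _ hn, Nat.div_eq_of_lt (by omega)]
  omega

lemma cond_iff (n m : Nat) (hn : 0 < n) (hm : 0 < m) :
    (m % (n * ((m - 1) / n + 1)) = 0) ↔ n ∣ m := by
  by_cases hd : n ∣ m
  · rw [div_pred_dvd n m hn hm hd]
    obtain ⟨k, rfl⟩ := hd
    rw [Nat.mul_div_cancel_left k hn]
    exact iff_of_true (Nat.mod_self _) ⟨k, rfl⟩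
  · rw [div_pred_not_dvd n m hn hm hd]
    have hr : m % n ≠ 0 := fun h => hd (Nat.dvd_of_mod_eq_zero h)
    have hdm := Nat.div_add_mod m n
    have hlt : m % n < n := Nat.mod_lt _ hn
    have hmod : m < n * (m / n + 1) := by
      have : n * (m / n + 1) = n * (m / n) + n := by ring
      omega
    rw [Nat.mod_eq_of_lt hmod]
    exact iff_of_false (by omega) hd

-- snoc characterisation of chunks
lemma modify_append_last {α : Type} (l : List α) (r : α) (f : α → α) :
    (l ++ [r]).modify l.length f = l ++ [f r] := by
  induction l with
  | nil => simp [List.modify]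
  | cons a t ih => simpa [List.modify] using ih

lemma chunks_snoc (n : Nat) (hn : 0 < n) (l : List Int) (x : Int) :
    chunks n (l ++ [x]) =
      if n ∣ l.length then chunks n l ++ [[x]]
      else (chunks n l).modify ((chunks n l).length - 1) (· ++ [x]) := by
  induction hL : l.length using Nat.strong_induction_on generalizing l with
  | _ L ih =>
  subst hL
  rcases eq_or_ne l [] with rfl | hne
  · rw [if_pos (by simp), chunks_nil, chunks_cons n hn ([] ++ [x]) (by simp),
      List.take_of_length_le (by simpa using hn), List.drop_eq_nil_of_le (by simpa using hn),
      chunks_nil]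
    simp
  · have h0 : 0 < l.length := List.length_pos_iff.mpr hne
    by_cases hle : l.length < n
    · have hnd : ¬ n ∣ l.length := fun hdd => absurd (Nat.le_of_dvd h0 hdd) (by omega)
      rw [if_neg hnd]
      rw [chunks_cons n hn (l ++ [x]) (by simp), chunks_cons n hn l hne]
      rw [List.take_of_length_le (by simp; omega), List.take_of_length_le (by omega),
        List.drop_eq_nil_of_le (by simp; omega), List.drop_eq_nil_of_le (by omega),
        chunks_nil]
      simp [List.modify]
    · have hlen : n ≤ l.length := by omega
      have hdl : (l.drop n).length = l.length - n := by simp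
      rw [chunks_cons n hn (l ++ [x]) (by simp), chunks_cons n hn l hne]
      rw [List.take_append_of_le_length hlen, List.drop_append_of_le_length hlen]
      rw [ih (l.drop n).length (by omega) (l.drop n) rfl]
      by_cases hd : n ∣ l.length
      · have hd' : n ∣ (l.drop n).length := by rw [hdl]; exact Nat.dvd_sub hd (dvd_refl n)
        rw [if_pos hd', if_pos hd]
        simp
      · have hd' : ¬ n ∣ (l.drop n).length := by
          rw [hdl]
          intro hc
          exact hd (by
            have := Nat.dvd_add hc (dvd_refl n)
            rwa [Nat.sub_add_cancel hlen] at this)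
        rw [if_neg hd', if_neg hd]
        have hgt : n < l.length := by
          rcases eq_or_lt_of_le hlen with h | h
          · exact absurd (h ▸ dvd_refl n) hd
          · exact h
        have hdne : l.drop n ≠ [] := by
          rw [← List.length_pos_iff]; omega
        have hcl := chunks_length n hn (l.drop n) hdne
        have hpos : 0 < (chunks n (l.drop n)).length := by rw [hcl]; exact Nat.succ_pos _
        rw [List.length_cons,
          show (chunks n (l.drop n)).length + 1 - 1 = ((chunks n (l.drop n)).length - 1) + 1 by omega,
          List.modify_succ_cons]

-- A's loop invariant: after processing the first m elements the state is
-- (the chunks of the prefix, the index of the last row)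
lemma a_loop (vec : List Int) (n : Nat) (hn : 0 < n)
    (m : Nat) (hm : 1 ≤ m) (hmL : m ≤ vec.length) :
    ((PySem.List.pyRange 0 m 1).foldl
      (fun (st : List (List Int) × Int) i =>
        let matrix := st.1
        let row := st.2
        if PySem.Int.mod i ((n : Int) * (row + 1)) == 0 then
          let row := if row != 0 || i != 0 then row + 1 else row
          (pyAppendAt (matrix ++ [[]]) row (PySem.List.pyGetD vec i 0), row)
        else
          (pyAppendAt matrix row (PySem.List.pyGetD vec i 0), row))
      ([], 0)) = (chunks n (vec.take m), (((m - 1) / n : Nat) : Int)) := by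
  induction m with
  | zero => omega
  | succ m ihm =>
    rcases Nat.eq_zero_or_pos m with rfl | hm1
    · -- base case m + 1 = 1
      have hvne : vec ≠ [] := List.ne_nil_of_length_pos (by omega)
      obtain ⟨v, rest, rfl⟩ := List.exists_cons_of_ne_nil hvne
      rw [show ((0+1 : Nat) : Int) = 0 + 1 by norm_num,
        PySem.List.pyRange_one_succ_right (le_refl 0), pyRange_pos_nil 0 0 1 one_pos le_rfl]
      simp only [List.nil_append, List.foldl_cons, List.foldl_nil]
      have hc : PySem.Int.mod 0 ((n : Int) * (0 + 1)) == 0 := by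
        simp [PySem.Int.mod, Int.zero_fmod]
      rw [if_pos hc]
      have ht1 : (v :: rest).take 1 = [v] := rfl
      rw [ht1, chunks_cons n hn [v] (by simp), List.take_of_length_le (by simpa using hn),
        List.drop_eq_nil_of_le (by simp; omega), chunks_nil]
      simp [pyAppendAt, List.modify, PySem.List.pyGetD_zero_cons]
    · -- inductive step: peel off index m on the right
      have hq := ihm hm1 (by omega)
      rw [show (((m+1 : Nat)) : Int) = (m : Int) + 1 by push_cast; ring,
        PySem.List.pyRange_one_succ_right (by positivity), List.foldl_append, hq]
      simp only [List.foldl_cons, List.foldl_nil]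
      set q : Nat := (m - 1) / n with hqdef
      clear_value q
      have htm : vec.take m ≠ [] := by
        simp [← List.length_pos_iff, List.length_take]; omega
      have hcl : (chunks n (vec.take m)).length = q + 1 := by
        rw [chunks_length n hn (vec.take m) htm, List.length_take, min_eq_left (by omega), hqdef]
      have hmod : PySem.Int.mod (m : Int) ((n : Int) * (((q : Nat) : Int) + 1))
          = ((m % (n * (q + 1)) : Nat) : Int) := by
        rw [show ((n : Int) * (((q : Nat) : Int) + 1)) = ((n * (q + 1) : Nat) : Int) by push_cast; ring]
        simpa [PySem.Int.mod] using (Int.ofNat_fmod m (n * (q+1))).symm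
      have hx : PySem.List.pyGetD vec (m : Int) 0 = vec.getD m 0 := PySem.List.pyGetD_natCast vec m 0
      have htake : vec.take (m + 1) = vec.take m ++ [vec.getD m 0] := by
        rw [List.take_succ]
        congr 1
        rw [List.getElem?_eq_getElem (by omega)]
        simp [List.getD, List.getElem?_eq_getElem (show m < vec.length by omega)]
      by_cases hd : n ∣ m
      · have hcond : (PySem.Int.mod (m : Int) ((n : Int) * (((q : Nat) : Int) + 1)) == 0) = true := by
          rw [hmod]
          simp only [beq_iff_eq, Int.natCast_eq_zero]
          rw [hqdef]
          exact (cond_iff n m hn hm1).mpr hd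
        rw [if_pos hcond]
        have hrow : ((if ((q : Nat) : Int) != 0 || (m : Int) != 0 then ((q : Nat) : Int) + 1 else ((q : Nat) : Int))) = ((q : Nat) : Int) + 1 := by
          have : ((m : Int) != 0) = true := by simp; omega
          simp [this]
        rw [hrow]
        have happ : pyAppendAt (chunks n (vec.take m) ++ [[]]) (((q : Nat) : Int) + 1) (PySem.List.pyGetD vec (m : Int) 0)
            = chunks n (vec.take m) ++ [[vec.getD m 0]] := by
          rw [hx, pyAppendAt, show ((((q : Nat) : Int)) + 1).toNat = q + 1 by omega, ← hcl,
            modify_append_last]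
          simp
        rw [happ]
        simp only [Prod.mk.injEq]
        refine ⟨?_, ?_⟩
        · rw [htake, chunks_snoc n hn (vec.take m) (vec.getD m 0),
            if_pos (by rw [List.length_take, min_eq_left (by omega)]; exact hd)]
        · show ((q : Nat) : Int) + 1 = (((m + 1 - 1) / n : Nat) : Int)
          rw [hqdef]
          have := div_pred_dvd n m hn hm1 hd
          push_cast
          omega
      · have hcond : (PySem.Int.mod (m : Int) ((n : Int) * (((q : Nat) : Int) + 1)) == 0) = false := by
          rw [hmod]
          simp only [beq_eq_false_iff_ne, ne_eq, Int.natCast_eq_zero]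
          rw [hqdef]
          exact fun h => hd ((cond_iff n m hn hm1).mp h)
        rw [if_neg (by simp [hcond])]
        have happ : pyAppendAt (chunks n (vec.take m)) ((q : Nat) : Int) (PySem.List.pyGetD vec (m : Int) 0)
            = (chunks n (vec.take m)).modify ((chunks n (vec.take m)).length - 1) (· ++ [vec.getD m 0]) := by
          rw [hx, pyAppendAt, show (((q : Nat) : Int)).toNat = q by omega, hcl]
          simp
        rw [happ]
        simp only [Prod.mk.injEq]
        refine ⟨?_, ?_⟩
        · rw [htake, chunks_snoc n hn (vec.take m) (vec.getD m 0),
            if_neg (by rw [List.length_take, min_eq_left (by omega)]; exact hd)]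
        · show ((q : Nat) : Int) = (((m + 1 - 1) / n : Nat) : Int)
          rw [hqdef]
          have := div_pred_not_dvd n m hn hm1 hd
          push_cast
          omega

-- ===== VERDICT (by name: the statement is the Claim_ definition above) =====
theorem vector_to_matrix_spec : Claim_equal_vector_to_matrix := by
  intro vec _
  unfold Spec_vector_to_matrix vector_to_matrix vector_to_matrix_alt
  rcases eq_or_ne vec [] with rfl | hne
  · rfl
  · have h0 : 0 < vec.length := List.length_pos_iff.mpr hne
    have hn : 0 < Nat.sqrt vec.length := Nat.sqrt_pos.mpr h0
    set n : Nat := Nat.sqrt vec.length with hndef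
    have hsq : pySqrtLen vec = (n : Int) := rfl
    simp only [hsq]
    rw [if_neg (by simp; omega)]
    rw [a_loop vec n hn vec.length (by omega) (le_refl _)]
    rw [alt_eq_chunks n hn vec]
    simp [List.take_length]
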